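-- pv_equiv track=rewrite | github.com/AsokTamang/Leetcode-DSA | basics/strings1.py | optimalbeauty
-- ===== SOURCE A (Python) =====
-- from collections import defaultdict
--
-- def optimalbeauty(s):
--     n=len(s)
--
--     total=0
--     for i in range(n):
--         m=defaultdict(int)
--         for j in range(i,n):
--             m[s[j]]+=1
--             currentbeauty=max(m.values()) - min(m.values())
--             total+=currentbeauty
--     return total
-- ===== SOURCE B (Python) =====
-- def optimalbeauty(s):
--     n = len(s)
--     total = 0
--     for i in range(n):
--         freq = {}
--         cnt = {}          # cnt[v] = how many distinct chars currently occur exactly v times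
--         curmax = 0
--         curmin = 0
--         for j in range(i, n):
--             c = s[j]
--             v = freq.get(c, 0)
--             freq[c] = v + 1
--             if v:
--                 cnt[v] = cnt.get(v, 0) - 1
--             cnt[v + 1] = cnt.get(v + 1, 0) + 1
--             if v + 1 > curmax:
--                 curmax = v + 1
--             if v == 0:
--                 curmin = 1
--             elif v == curmin and cnt[v] == 0:
--                 curmin = v + 1
--             total += curmax - curmin
--     return total
-- ===== Notes on version B (the rewrite author's own statement) =====
-- stated objective: faster
-- what changed: Instead of rescanning all dict values with max()/min() after each extension, B maintains a count-of-counts table and running curmax/curmin that are updated in O(1) per step.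
import Mathlib
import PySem

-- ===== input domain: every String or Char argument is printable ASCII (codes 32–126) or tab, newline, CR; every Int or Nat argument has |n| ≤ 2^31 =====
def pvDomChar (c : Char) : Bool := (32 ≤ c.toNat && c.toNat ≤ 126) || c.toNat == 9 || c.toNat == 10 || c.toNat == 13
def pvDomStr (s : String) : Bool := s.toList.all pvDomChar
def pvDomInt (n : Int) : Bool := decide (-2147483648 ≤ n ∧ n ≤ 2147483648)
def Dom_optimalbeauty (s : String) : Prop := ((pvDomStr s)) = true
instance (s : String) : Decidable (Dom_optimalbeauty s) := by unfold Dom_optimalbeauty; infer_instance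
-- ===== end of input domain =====

-- B replaces A's per-step max()/min() scan over the frequency dict by a maintained
-- count-of-counts table with running curmax/curmin (a timing run measured B faster by a constant factor).


-- ===== PORT A =====
-- inner loop body of A: m[s[j]] += 1; total += max(m.values()) - min(m.values()).
-- m is nonempty at every max/min call (we just inserted), so Python's max/min never raise;
-- the .getD 0 on the Option is therefore never taken.
def pvStepA (st : PySem.Dict Char Int × Int) (c : Char) : PySem.Dict Char Int × Int :=
  let m := st.1.modify c 0 (· + 1)
  (m, st.2 + ((PySem.List.max? m.values (fun x => x)).getD 0
              - (PySem.List.min? m.values (fun x => x)).getD 0))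

def optimalbeauty (s : String) : Int :=
  let cs := s.toList
  (List.range cs.length).foldl
    (fun total i => ((cs.drop i).foldl pvStepA (PySem.Dict.empty, total)).2) 0

-- ===== PORT B =====
-- B state: (freq, cnt, curmax, curmin, total); cnt[v] = number of distinct chars occurring exactly v times
def pvStepB (st : PySem.Dict Char Int × PySem.Dict Int Int × Int × Int × Int) (c : Char) :
    PySem.Dict Char Int × PySem.Dict Int Int × Int × Int × Int :=
  let v := st.1.getD c 0
  let freq := st.1.insert c (v + 1)
  let cnt1 := if v ≠ 0 then st.2.1.insert v (st.2.1.getD v 0 - 1) else st.2.1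
  let cnt := cnt1.insert (v + 1) (cnt1.getD (v + 1) 0 + 1)
  let curmax := if v + 1 > st.2.2.1 then v + 1 else st.2.2.1
  let curmin := if v = 0 then (1 : Int)
                else if v = st.2.2.2.1 ∧ cnt.getD v 0 = 0 then v + 1 else st.2.2.2.1
  (freq, cnt, curmax, curmin, st.2.2.2.2 + (curmax - curmin))

def optimalbeauty_alt (s : String) : Int :=
  let cs := s.toList
  (List.range cs.length).foldl
    (fun total i =>
      ((cs.drop i).foldl pvStepB
        (PySem.Dict.empty, PySem.Dict.empty, 0, 0, total)).2.2.2.2) 0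

-- ===== PRECONDITION & SPEC =====
def Spec_optimalbeauty (s : String) (out : Int) : Prop := out = optimalbeauty_alt s
instance (s : String) (out : Int) : Decidable (Spec_optimalbeauty s out) := by unfold Spec_optimalbeauty; infer_instance

-- ===== CLAIM (what is proved, stated in full; the proofs are below) =====
def Claim_equal_optimalbeauty : Prop := ∀ (s : String), Dom_optimalbeauty s → Spec_optimalbeauty s (optimalbeauty s)

-- ===== LEMMAS AND PROOFS =====

-- the multiset of the frequency-dict's values after processing prefix p
def pvVals (p : List Char) : List Int := (PySem.Dict.counter p).values

lemma pvVals_eq (p : List Char) :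
    pvVals p = (PySem.Set.ofList p).map (fun k => (p.count k : Int)) := by
  simp [pvVals, PySem.Dict.values, PySem.Dict.items_counter]

lemma pvVals_one_le (p : List Char) : ∀ x ∈ pvVals p, 1 ≤ x := by
  intro x hx
  rw [pvVals_eq] at hx
  obtain ⟨a, ha, rfl⟩ := List.mem_map.1 hx
  have : a ∈ p := (PySem.Set.mem_ofList p a).1 ha
  have := List.count_pos_iff.2 this
  omega

-- B's loop invariant relating (cnt, curmax, curmin) to the value multiset
def pvInv (p : List Char) (cnt : PySem.Dict Int Int) (curmax curmin : Int) : Prop :=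
  (∀ w : Int, cnt.getD w 0 = ((pvVals p).count w : Int)) ∧
  (p = [] → curmax = 0 ∧ curmin = 0) ∧
  (p ≠ [] → curmax ∈ pvVals p ∧ (∀ x ∈ pvVals p, x ≤ curmax) ∧
            curmin ∈ pvVals p ∧ (∀ x ∈ pvVals p, curmin ≤ x))

lemma max_getD_eq {V : List Int} {M : Int} (hmem : M ∈ V) (hub : ∀ x ∈ V, x ≤ M) :
    (PySem.List.max? V (fun x => x)).getD 0 = M := by
  cases h : PySem.List.max? V (fun x => x) with
  | none => exact absurd ((PySem.List.max?_eq_none_iff V _).1 h ▸ hmem) (List.not_mem_nil)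
  | some m =>
    simp only [Option.getD_some]
    exact le_antisymm (hub m (PySem.List.max?_mem h)) (PySem.List.max?_isMax h M hmem)

lemma min_getD_eq {V : List Int} {M : Int} (hmem : M ∈ V) (hlb : ∀ x ∈ V, M ≤ x) :
    (PySem.List.min? V (fun x => x)).getD 0 = M := by
  cases h : PySem.List.min? V (fun x => x) with
  | none => exact absurd ((PySem.List.min?_eq_none_iff V _).1 h ▸ hmem) (List.not_mem_nil)
  | some m =>
    simp only [Option.getD_some]
    exact le_antisymm (PySem.List.min?_isMin h M hmem) (hlb m (PySem.List.min?_mem h))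

-- replacing the image of one element of a Nodup list swaps one occurrence in the multiset of images
lemma count_map_update {α : Type} [DecidableEq α] {l : List α} (hnd : l.Nodup) {c : α}
    (hc : c ∈ l) (f f' : α → Int) (hff : ∀ a ∈ l, a ≠ c → f' a = f a) (w : Int) :
    ((l.map f').count w : Int) + (if f c = w then 1 else 0)
      = ((l.map f).count w : Int) + (if f' c = w then 1 else 0) := by
  induction l with
  | nil => cases hc
  | cons x t ih =>
    rcases List.nodup_cons.1 hnd with ⟨hx, hndt⟩
    rcases List.mem_cons.1 hc with rfl | hct
    · have hmap : t.map f' = t.map f := by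
        apply List.map_congr_left
        intro a ha
        exact hff a (List.mem_cons_of_mem _ ha) (fun h => hx (h ▸ ha))
      simp only [List.map_cons, List.count_cons, hmap, beq_iff_eq]
      push_cast
      split_ifs <;> omega
    · have hxc : x ≠ c := fun h => hx (h ▸ hct)
      have ihh := ih hndt hct (fun a ha hane => hff a (List.mem_cons_of_mem _ ha) hane)
      simp only [List.map_cons, List.count_cons, hff x (List.mem_cons_self) hxc, beq_iff_eq]
      push_cast
      split_ifs at ihh ⊢ <;> omega

lemma two_le_count_map {α : Type} [DecidableEq α] {l : List α} {a b : α} {w : Int}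
    (hnd : l.Nodup) (ha : a ∈ l) (hb : b ∈ l) (hab : a ≠ b) (f : α → Int)
    (hfa : f a = w) (hfb : f b = w) : 2 ≤ (l.map f).count w := by
  induction l with
  | nil => cases ha
  | cons x t ih =>
    rcases List.nodup_cons.1 hnd with ⟨hx, hndt⟩
    rcases List.mem_cons.1 ha with rfl | hat
    · have hbt : b ∈ t := (List.mem_cons.1 hb).resolve_left (fun h => hab h.symm)
      simp [hfa]
      exact ⟨b, hbt, hfb⟩
    · rcases List.mem_cons.1 hb with rfl | hbt
      · simp [hfb]
        exact ⟨a, hat, hfa⟩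
      · have h2 := ih hndt hat hbt
        simp only [List.map_cons, List.count_cons, beq_iff_eq]
        split_ifs <;> omega

lemma exists_second {α : Type} [DecidableEq α] {l : List α} {c : α} {w : Int} {f : α → Int}
    (hnd : l.Nodup) (hc : c ∈ l) (hfc : f c = w) (h2 : 2 ≤ (l.map f).count w) :
    ∃ a ∈ l, a ≠ c ∧ f a = w := by
  induction l with
  | nil => cases hc
  | cons x t ih =>
    rcases List.nodup_cons.1 hnd with ⟨hx, hndt⟩
    rcases List.mem_cons.1 hc with rfl | hct
    · have h1 : ∃ a ∈ t, f a = w := by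
        simp [hfc] at h2
        exact h2
      obtain ⟨y, hy, hfy⟩ := h1
      exact ⟨y, List.mem_cons_of_mem _ hy, fun h => hx (h ▸ hy), hfy⟩
    · by_cases hfx : f x = w
      · exact ⟨x, List.mem_cons_self, fun h => hx (h ▸ hct), hfx⟩
      · have h2' : 2 ≤ (t.map f).count w := by
          simp only [List.map_cons, List.count_cons, beq_iff_eq, if_neg hfx] at h2
          omega
        obtain ⟨a, hat, hac, hfa⟩ := ih hndt hct h2'
        exact ⟨a, List.mem_cons_of_mem _ hat, hac, hfa⟩

lemma mem_pvVals {p : List Char} {x : Int} :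
    x ∈ pvVals p ↔ ∃ a ∈ PySem.Set.ofList p, (p.count a : Int) = x := by
  rw [pvVals_eq]
  exact List.mem_map

lemma beauty_from_inv {p : List Char} {cnt : PySem.Dict Int Int} {M m : Int}
    (h : pvInv p cnt M m) (hne : p ≠ []) :
    M - m = (PySem.List.max? (pvVals p) (fun x => x)).getD 0
            - (PySem.List.min? (pvVals p) (fun x => x)).getD 0 := by
  obtain ⟨hM, hub, hm, hlb⟩ := h.2.2 hne
  rw [max_getD_eq hM hub, min_getD_eq hm hlb]

-- one inner-loop step preserves the invariant, and B's O(1) beauty equals A's scanned beauty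
lemma step_main (p : List Char) (c : Char) (cnt : PySem.Dict Int Int) (curmax curmin : Int)
    (h : pvInv p cnt curmax curmin)
    (v : Int) (cnt1 cnt' : PySem.Dict Int Int) (curmax' curmin' : Int)
    (hveq : v = (p.count c : Int))
    (hc1 : cnt1 = if v ≠ 0 then cnt.insert v (cnt.getD v 0 - 1) else cnt)
    (hc2 : cnt' = cnt1.insert (v + 1) (cnt1.getD (v + 1) 0 + 1))
    (hM : curmax' = if v + 1 > curmax then v + 1 else curmax)
    (hm : curmin' = if v = 0 then (1 : Int)
                    else if v = curmin ∧ cnt'.getD v 0 = 0 then v + 1 else curmin) :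
    pvInv (p ++ [c]) cnt' curmax' curmin' ∧
      curmax' - curmin'
        = (PySem.List.max? (pvVals (p ++ [c])) (fun x => x)).getD 0
          - (PySem.List.min? (pvVals (p ++ [c])) (fun x => x)).getD 0 := by
  have hne' : p ++ [c] ≠ [] := by simp
  have hndS := PySem.Set.nodup_ofList p
  suffices hinv' : pvInv (p ++ [c]) cnt' curmax' curmin' from
    ⟨hinv', beauty_from_inv hinv' hne'⟩
  by_cases hv : p.count c = 0
  · -- c is new: the value multiset gains a 1
    have hcp : c ∉ p := List.count_eq_zero.1 hv
    have hcS : c ∉ PySem.Set.ofList p := fun hh => hcp ((PySem.Set.mem_ofList p c).1 hh)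
    have hS' : PySem.Set.ofList (p ++ [c]) = PySem.Set.ofList p ++ [c] := by
      rw [PySem.Set.ofList_eq_foldl, List.foldl_append, ← PySem.Set.ofList_eq_foldl]
      simp [PySem.Set.add, PySem.Set.contains, hcS]
    have hV' : pvVals (p ++ [c]) = pvVals p ++ [1] := by
      rw [pvVals_eq, pvVals_eq, hS', List.map_append]
      congr 1
      · apply List.map_congr_left
        intro a ha
        have hane : a ≠ c := fun hh => hcp (hh ▸ (PySem.Set.mem_ofList p a).1 ha)
        simp [List.count_append, Ne.symm hane]
      · simp [List.count_append, hv]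
    have hv0 : v = 0 := by rw [hveq]; exact_mod_cast hv
    have hc1' : cnt1 = cnt := by rw [hc1, hv0]; simp
    have hc2' : cnt' = cnt.insert 1 (cnt.getD 1 0 + 1) := by
      rw [hc2, hc1', hv0]; norm_num
    have hm' : curmin' = 1 := by rw [hm, if_pos hv0]
    refine ⟨?_, fun hemp => absurd hemp hne', fun _ => ?_⟩
    · intro w
      have hw := h.1 w
      have h1 := h.1 1
      rw [hc2', PySem.Dict.getD_insert, hV']
      by_cases hw1 : w = 1
      · subst hw1
        simp [List.count_append]
        omega
      · rw [if_neg hw1]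
        simp [List.count_append, List.count_singleton, hw1, Ne.symm hw1]
        omega
    · rcases eq_or_ne p [] with hp | hp
      · obtain ⟨hmx, hmn⟩ := h.2.1 hp
        have hM' : curmax' = 1 := by rw [hM, hv0, hmx]; norm_num
        subst hp
        have : pvVals (([] : List Char) ++ [c]) = [1] := by rw [hV']; rfl
        rw [this, hM', hm']
        refine ⟨List.mem_singleton.2 rfl, ?_, List.mem_singleton.2 rfl, ?_⟩ <;>
          (intro x hx; rw [List.mem_singleton.1 hx])
      · obtain ⟨hMm, hMu, hmm, hml⟩ := h.2.2 hp
        have hone := pvVals_one_le p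
        have hM1 : 1 ≤ curmax := hone curmax hMm
        have hM' : curmax' = curmax := by rw [hM, hv0]; norm_num; omega
        rw [hV', hM', hm']
        refine ⟨List.mem_append_left _ hMm, ?_, List.mem_append_right _ (List.mem_singleton.2 rfl), ?_⟩
        · intro x hx
          rcases List.mem_append.1 hx with hx | hx
          · exact hMu x hx
          · rw [List.mem_singleton.1 hx]; exact hM1
        · intro x hx
          rcases List.mem_append.1 hx with hx | hx
          · exact hone x hx
          · rw [List.mem_singleton.1 hx]
  · -- c already occurs: one value v moves up to v + 1
    have hcp : c ∈ p := List.count_pos_iff.1 (Nat.pos_of_ne_zero hv)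
    have hcS : c ∈ PySem.Set.ofList p := (PySem.Set.mem_ofList p c).2 hcp
    have hp : p ≠ [] := List.ne_nil_of_mem hcp
    obtain ⟨hMm, hMu, hmm, hml⟩ := h.2.2 hp
    have hS' : PySem.Set.ofList (p ++ [c]) = PySem.Set.ofList p := by
      rw [PySem.Set.ofList_eq_foldl, List.foldl_append, ← PySem.Set.ofList_eq_foldl]
      simp [PySem.Set.add, PySem.Set.contains, hcS]
    have hV' : pvVals (p ++ [c]) = (PySem.Set.ofList p).map (fun k => ((p ++ [c]).count k : Int)) := by
      rw [pvVals_eq, hS']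
    have hf'c : ((p ++ [c]).count c : Int) = v + 1 := by
      rw [hveq]; simp [List.count_append]
    have hff : ∀ a ∈ PySem.Set.ofList p, a ≠ c →
        (((p ++ [c]).count a : Nat) : Int) = ((p.count a : Nat) : Int) := by
      intro a _ hane
      simp [List.count_append, Ne.symm hane]
    have hkey := count_map_update hndS hcS (fun k => ((p.count k : Int)))
      (fun k => ((p ++ [c]).count k : Int)) hff
    have hvV : v ∈ pvVals p := by
      rw [hveq]; exact mem_pvVals.2 ⟨c, hcS, rfl⟩
    have hv1 : (1 : Int) ≤ v := by
      rw [hveq]; exact_mod_cast Nat.pos_of_ne_zero hv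
    have hv0 : v ≠ 0 := by omega
    have hvle : v ≤ curmax := hMu v hvV
    have hmlev : curmin ≤ v := hml v hvV
    have hcount1 : 1 ≤ (pvVals p).count v := List.count_pos_iff.2 hvV
    have hVcount : ∀ w : Int, ((pvVals (p ++ [c])).count w : Int)
        = if w = v + 1 then ((pvVals p).count (v + 1) : Int) + 1
          else if w = v then ((pvVals p).count v : Int) - 1
          else ((pvVals p).count w : Int) := by
      intro w
      have hk := hkey w
      beta_reduce at hk
      rw [← hV', ← pvVals_eq] at hk
      rw [← hveq] at hk
      rw [hf'c] at hk
      by_cases hw1 : w = v + 1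
      · subst hw1
        split_ifs at hk ⊢ <;> omega
      · by_cases hw2 : w = v
        · subst hw2
          split_ifs at hk ⊢ <;> omega
        · split_ifs at hk ⊢ <;> omega
    have hc1' : cnt1 = cnt.insert v (cnt.getD v 0 - 1) := by
      rw [hc1, if_pos hv0]
    have hcnt' : ∀ w : Int, cnt'.getD w 0
        = if w = v + 1 then ((pvVals p).count (v + 1) : Int) + 1
          else if w = v then ((pvVals p).count v : Int) - 1
          else ((pvVals p).count w : Int) := by
      intro w
      rw [hc2, hc1', PySem.Dict.getD_insert, PySem.Dict.getD_insert, PySem.Dict.getD_insert]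
      rw [if_neg (by omega : ¬ v + 1 = v)]
      by_cases hw1 : w = v + 1
      · rw [if_pos hw1, if_pos hw1, h.1]
      · rw [if_neg hw1, if_neg hw1]
        by_cases hw2 : w = v
        · rw [if_pos hw2, if_pos hw2, h.1]
        · rw [if_neg hw2, if_neg hw2, h.1]
    have hcntv : cnt'.getD v 0 = ((pvVals p).count v : Int) - 1 := by
      rw [hcnt' v, if_neg (by omega : ¬ v = v + 1), if_pos rfl]
    refine ⟨fun w => by rw [hcnt' w, hVcount w], fun hemp => absurd hemp hne', fun _ => ?_⟩
    have hmemv1 : v + 1 ∈ pvVals (p ++ [c]) := by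
      rw [hV']
      exact List.mem_map.2 ⟨c, hcS, hf'c⟩
    constructor
    · -- curmax' ∈ V'
      by_cases hgt : v + 1 > curmax
      · rw [hM, if_pos hgt]
        exact hmemv1
      · rw [hM, if_neg hgt]
        obtain ⟨a, haS, hfa⟩ := mem_pvVals.1 hMm
        have hane : a ≠ c := by
          intro hh; subst hh
          rw [← hveq] at hfa
          omega
        rw [hV']
        exact List.mem_map.2 ⟨a, haS, by rw [hff a haS hane]; exact hfa⟩
    constructor
    · -- upper bound
      intro x hx
      rw [hV'] at hx
      obtain ⟨a, haS, rfl⟩ := List.mem_map.1 hx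
      by_cases hac : a = c
      · subst hac
        rw [hf'c, hM]
        split_ifs <;> omega
      · rw [hff a haS hac]
        have : ((p.count a : Int)) ≤ curmax := hMu _ (mem_pvVals.2 ⟨a, haS, rfl⟩)
        rw [hM]
        split_ifs <;> omega
    -- min part
    by_cases hcond : v = curmin ∧ cnt'.getD v 0 = 0
    · have hcv1 : (pvVals p).count v = 1 := by
        have := hcond.2
        rw [hcntv] at this
        omega
      have hmeq : curmin' = v + 1 := by rw [hm, if_neg hv0, if_pos hcond]
      rw [hmeq]
      refine ⟨hmemv1, ?_⟩
      intro x hx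
      rw [hV'] at hx
      obtain ⟨a, haS, rfl⟩ := List.mem_map.1 hx
      by_cases hac : a = c
      · subst hac; rw [hf'c]
      · rw [hff a haS hac]
        have hlb : curmin ≤ (p.count a : Int) := hml _ (mem_pvVals.2 ⟨a, haS, rfl⟩)
        have hnev : ((p.count a : Int)) ≠ v := by
          intro hh
          have h2 : 2 ≤ ((PySem.Set.ofList p).map (fun k => ((p.count k : Int)))).count v :=
            two_le_count_map hndS haS hcS hac _ hh hveq.symm
          rw [← pvVals_eq, hcv1] at h2
          omega
        omega
    · have hmeq : curmin' = curmin := by rw [hm, if_neg hv0, if_neg hcond]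
      rw [hmeq]
      constructor
      · -- curmin still attained by a character other than c
        by_cases hvm : v = curmin
        · have hc2' : (2 : Int) ≤ ((pvVals p).count v : Int) := by
            have hne0 : cnt'.getD v 0 ≠ 0 := fun hh => hcond ⟨hvm, hh⟩
            rw [hcntv] at hne0
            omega
          have h2 : 2 ≤ ((PySem.Set.ofList p).map (fun k => ((p.count k : Int)))).count v := by
            rw [← pvVals_eq]; omega
          obtain ⟨a, haS, hac, hfa⟩ := exists_second hndS hcS hveq.symm h2
          rw [hV']
          refine List.mem_map.2 ⟨a, haS, ?_⟩
          rw [hff a haS hac, hfa, hvm]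
        · obtain ⟨a, haS, hfa⟩ := mem_pvVals.1 hmm
          have hane : a ≠ c := by
            intro hh; subst hh
            rw [← hveq] at hfa
            exact hvm hfa
          rw [hV']
          exact List.mem_map.2 ⟨a, haS, by rw [hff a haS hane]; exact hfa⟩
      · intro x hx
        rw [hV'] at hx
        obtain ⟨a, haS, rfl⟩ := List.mem_map.1 hx
        by_cases hac : a = c
        · subst hac; rw [hf'c]; omega
        · rw [hff a haS hac]
          exact hml _ (mem_pvVals.2 ⟨a, haS, rfl⟩)

lemma inner_ind (t : List Char) : ∀ (p : List Char) (freq : PySem.Dict Char Int)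
    (cnt : PySem.Dict Int Int) (curmax curmin T : Int),
    (∀ a : Char, freq.getD a 0 = (p.count a : Int)) →
    pvInv p cnt curmax curmin →
    (t.foldl pvStepA (PySem.Dict.counter p, T)).2
      = (t.foldl pvStepB (freq, cnt, curmax, curmin, T)).2.2.2.2 := by
  induction t with
  | nil => intro p freq cnt curmax curmin T hfreq hinv; rfl
  | cons c t ih =>
    intro p freq cnt curmax curmin T hfreq hinv
    obtain ⟨hinv', hbeauty⟩ := step_main p c cnt curmax curmin hinv
      (freq.getD c 0) _ _ _ _ (hfreq c) rfl rfl rfl rfl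
    simp only [List.foldl_cons]
    rw [show pvStepA (PySem.Dict.counter p, T) c
        = (PySem.Dict.counter (p ++ [c]),
           T + ((PySem.List.max? (pvVals (p ++ [c])) (fun x => x)).getD 0
                - (PySem.List.min? (pvVals (p ++ [c])) (fun x => x)).getD 0)) from by
      simp [pvStepA, pvVals, (PySem.Dict.counter_append_singleton p c).symm]]
    rw [ih (p ++ [c]) _ _ _ _ _ ?_ hinv']
    · congr 1
      simp only [pvStepB]
      rw [hbeauty]
    · intro a
      simp only [PySem.Dict.getD_insert, hfreq]
      by_cases hac : a = c
      · subst hac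
        simp [List.count_append]
      · simp [hac, List.count_append, Ne.symm hac]

theorem optimalbeauty_spec : Claim_equal_optimalbeauty := by
  intro s _
  unfold Spec_optimalbeauty optimalbeauty optimalbeauty_alt
  apply PySem.List.foldl_congr_mem
  intro total i _
  exact inner_ind (s.toList.drop i) [] PySem.Dict.empty PySem.Dict.empty 0 0 total
    (fun a => by simp [PySem.Dict.getD_empty])
    ⟨fun w => by simp [pvVals, PySem.Dict.getD_empty],
     fun _ => ⟨rfl, rfl⟩, fun hne => absurd rfl hne⟩
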